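-- pv_equiv track=rewrite | github.com/rebuilder945/FL_research | ast_research/python_code_5.23/lastterm_page7/success_code/祝铭-3225-2023-05-24_16_59_09.py | work
-- ===== SOURCE A (Python) =====
-- def work(a) :
--     numls = []
--     tmls = []
--     b = 1
--     for i in range(a+1) :
--         numls.append(i)
--         tmls.append(b)
--         b *= (i+1)
--     di = dict(zip(numls,tmls))
--     return di
-- ===== SOURCE B (Python) =====
-- def _fact(n):
--     r = 1
--     for k in range(2, n + 1):
--         r *= k
--     return r
--
--
-- def work(a):
--     return {i: _fact(i) for i in range(a + 1)}
-- ===== Notes on version B (the rewrite author's own statement) =====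
-- stated objective: idiomatic
-- what changed: Replaces the two parallel lists, running-product accumulator and dict(zip(...)) with a direct dict comprehension that computes each factorial independently via a helper.
import Mathlib
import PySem

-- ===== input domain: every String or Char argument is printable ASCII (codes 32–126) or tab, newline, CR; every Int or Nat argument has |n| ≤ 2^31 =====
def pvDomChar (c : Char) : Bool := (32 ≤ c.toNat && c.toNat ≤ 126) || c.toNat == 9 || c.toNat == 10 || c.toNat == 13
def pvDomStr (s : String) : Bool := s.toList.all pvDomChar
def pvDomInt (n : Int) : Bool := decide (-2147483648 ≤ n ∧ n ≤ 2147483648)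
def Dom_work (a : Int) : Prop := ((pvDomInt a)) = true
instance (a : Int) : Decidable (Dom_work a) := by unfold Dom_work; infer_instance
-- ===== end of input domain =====

-- B replaces A's parallel lists + running product + dict(zip) with a dict comprehension
-- computing each factorial independently (idiomatic; not faster).

-- ===== PORT A =====
def work (a : Int) : List (Int × Int) :=
  let s := (PySem.List.pyRange 0 (a + 1) 1).foldl
    (fun (s : List Int × List Int × Int) i =>
      (s.1 ++ [i], s.2.1 ++ [s.2.2], s.2.2 * (i + 1)))
    ([], [], 1)
  (PySem.Dict.ofList (s.1.zip s.2.1)).items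

-- ===== PORT B =====
def workFact (n : Int) : Int :=
  (PySem.List.pyRange 2 (n + 1) 1).foldl (fun r k => r * k) 1

def work_alt (a : Int) : List (Int × Int) :=
  (PySem.List.pyRange 0 (a + 1) 1).map (fun i => (i, workFact i))

-- ===== PRECONDITION & SPEC =====
def Spec_work (a : Int) (out : List (Int × Int)) : Prop := out = work_alt a
instance (a : Int) (out : List (Int × Int)) : Decidable (Spec_work a out) := by unfold Spec_work; infer_instance

-- ===== CLAIM (what is proved, stated in full; the proofs are below) =====
def Claim_equal_work : Prop := ∀ (a : Int), Dom_work a → Spec_work a (work a)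

-- ===== LEMMAS AND PROOFS =====

theorem workFact_succ (b : Int) (hb : 0 ≤ b) :
    workFact (b + 1) = workFact b * (b + 1) := by
  rcases eq_or_lt_of_le hb with h | h
  · subst h; decide
  · unfold workFact
    rw [PySem.List.pyRange_one_succ_right (by omega : (2:Int) ≤ b + 1),
      List.foldl_append]
    rfl

theorem work_loop (b : Int) (hb : 0 ≤ b) :
    (PySem.List.pyRange 0 b 1).foldl
      (fun (s : List Int × List Int × Int) i =>
        (s.1 ++ [i], s.2.1 ++ [s.2.2], s.2.2 * (i + 1)))
      ([], [], 1)
    = (PySem.List.pyRange 0 b 1,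
       (PySem.List.pyRange 0 b 1).map workFact, workFact b) := by
  induction b, hb using Int.le_induction with
  | base => decide
  | succ b hb ih =>
    rw [PySem.List.pyRange_one_succ_right hb, List.foldl_append, ih]
    simp [workFact_succ b hb]

theorem items_ofList_map_fst_nodup (l : List (Int × Int))
    (h : (l.map Prod.fst).Nodup) : (PySem.Dict.ofList l).items = l := by
  have := PySem.Dict.items_foldl_insert_fresh l Prod.fst Prod.snd PySem.Dict.empty
    (by intro a _; rfl) h
  simpa [PySem.Dict.ofList, PySem.Dict.update] using this

-- ===== VERDICT (by name: the statement is the Claim_ definition above) =====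
theorem work_spec : Claim_equal_work := by
  intro a _
  unfold Spec_work work work_alt
  by_cases h : 0 ≤ a + 1
  · rw [work_loop (a + 1) h]
    have hz : (PySem.List.pyRange 0 (a + 1) 1).zip
        ((PySem.List.pyRange 0 (a + 1) 1).map workFact)
        = (PySem.List.pyRange 0 (a + 1) 1).map (fun i => (i, workFact i)) := by
      simpa using
        (List.zip_map' (f := id) (g := workFact) (l := PySem.List.pyRange 0 (a + 1) 1))
    simp only [hz]
    apply items_ofList_map_fst_nodup
    simpa [List.map_map, Function.comp_def] using
      PySem.List.nodup_pyRange_one 0 (a + 1)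
  · rw [PySem.List.pyRange_one_eq_nil (by omega)]
    decide
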